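-- pv_equiv track=rewrite | github.com/hanzoai/python-sdk | pkg/hanzo-mcp/hanzo_mcp/tools/refactor/refactor_tool.py | _organize_js_imports
-- ===== SOURCE A (Python) =====
-- def _organize_js_imports(content: str) -> str:
--     """Organize JavaScript/TypeScript import statements."""
--     lines = content.split("\n")
--     imports = []
--     other_lines = []
--     in_imports = True
--
--     for line in lines:
--         stripped = line.strip()
--         if in_imports and stripped.startswith("import "):
--             imports.append(line)
--         elif in_imports and stripped == "":
--             continue  # Skip empty lines in import section
--         else:
--             in_imports = False
--             other_lines.append(line)
--
--     # Sort imports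
--     imports.sort(key=lambda x: x.strip().lower())
--
--     result = imports + [""] + other_lines if imports else other_lines
--     return "\n".join(result)
-- ===== SOURCE B (Python) =====
-- def _organize_js_imports(content: str) -> str:
--     """Organize JavaScript/TypeScript import statements (split-point version)."""
--     lines = content.split("\n")
--     boundary = len(lines)
--     for i, line in enumerate(lines):
--         s = line.strip()
--         if s != "" and not s.startswith("import "):
--             boundary = i
--             break
--     imports = sorted((l for l in lines[:boundary] if l.strip().startswith("import ")),
--                      key=lambda x: x.strip().lower())
--     rest = lines[boundary:]
--     return "\n".join(imports + [""] + rest) if imports else "\n".join(rest)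
-- ===== Notes on version B (the rewrite author's own statement) =====
-- stated objective: alternative
-- what changed: Replaces A's flag-driven single pass accumulating two lists with a two-phase split-point structure: find the boundary index (first non-blank, non-import line), sort the import lines filtered from the prefix slice, and take the suffix slice verbatim.
import Mathlib
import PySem

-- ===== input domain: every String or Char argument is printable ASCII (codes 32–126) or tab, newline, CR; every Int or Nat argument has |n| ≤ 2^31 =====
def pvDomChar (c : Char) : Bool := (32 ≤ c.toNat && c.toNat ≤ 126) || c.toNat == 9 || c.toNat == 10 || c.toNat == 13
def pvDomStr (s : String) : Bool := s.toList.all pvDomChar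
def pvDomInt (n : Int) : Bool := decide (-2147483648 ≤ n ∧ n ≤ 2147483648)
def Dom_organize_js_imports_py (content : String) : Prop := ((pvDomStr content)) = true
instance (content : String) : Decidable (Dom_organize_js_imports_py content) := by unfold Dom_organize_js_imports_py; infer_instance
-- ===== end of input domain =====

-- B replaces A's flag-driven single pass by a split-point + slice two-phase structure (objective: alternative decomposition, same cost).

-- ===== PORT A =====
-- loop body of A's for-loop, state = (imports, other_lines, in_imports)
def pvStepA (st : List String × List String × Bool) (line : String) : List String × List String × Bool :=
  let stripped := PySem.Str.strip line
  if st.2.2 && PySem.Str.startswith stripped "import " then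
    (st.1 ++ [line], st.2.1, st.2.2)
  else if st.2.2 && (stripped == "") then st
  else (st.1, st.2.1 ++ [line], false)

def organize_js_imports_py (content : String) : String :=
  let lines := (PySem.Str.split? content "\n").getD []
  let st := lines.foldl pvStepA ([], [], true)
  let imports := PySem.List.sorted st.1 (fun x => PySem.Str.lower (PySem.Str.strip x)) false
  if imports ≠ [] then PySem.Str.join "\n" (imports ++ [""] ++ st.2.1)
  else PySem.Str.join "\n" st.2.1

-- ===== PORT B =====
def pvIsImport (l : String) : Bool := PySem.Str.startswith (PySem.Str.strip l) "import "
-- the break condition of B's boundary scan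
def pvBoundaryPred (l : String) : Bool := (PySem.Str.strip l != "") && !(pvIsImport l)

def organize_js_imports_py_alt (content : String) : String :=
  let lines := (PySem.Str.split? content "\n").getD []
  let boundary := (lines.findIdx? pvBoundaryPred).getD lines.length
  let imports := PySem.List.sorted ((lines.take boundary).filter pvIsImport)
      (fun x => PySem.Str.lower (PySem.Str.strip x)) false
  let rest := lines.drop boundary
  if imports ≠ [] then PySem.Str.join "\n" (imports ++ [""] ++ rest)
  else PySem.Str.join "\n" rest

-- ===== PRECONDITION & SPEC =====
def Spec_organize_js_imports_py (content : String) (out : String) : Prop := out = organize_js_imports_py_alt content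
instance (content : String) (out : String) : Decidable (Spec_organize_js_imports_py content out) := by unfold Spec_organize_js_imports_py; infer_instance

-- ===== CLAIM (what is proved, stated in full; the proofs are below) =====
def Claim_equal_organize_js_imports_py : Prop := ∀ (content : String), Dom_organize_js_imports_py content → Spec_organize_js_imports_py content (organize_js_imports_py content)

-- ===== LEMMAS AND PROOFS =====

-- once in_imports is False, A's loop just appends every remaining line to other_lines
lemma foldA_false (lines : List String) (imp oth : List String) :
    lines.foldl pvStepA (imp, oth, false) = (imp, oth ++ lines, false) := by
  induction lines generalizing oth with
  | nil => simp
  | cons l t ih => simp [pvStepA, ih]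

-- in the import phase, A's loop computes exactly B's boundary split
lemma foldA_true (lines : List String) (imp : List String) :
    ∃ c, lines.foldl pvStepA (imp, [], true) =
      (imp ++ ((lines.take ((lines.findIdx? pvBoundaryPred).getD lines.length)).filter pvIsImport),
       lines.drop ((lines.findIdx? pvBoundaryPred).getD lines.length), c) := by
  induction lines generalizing imp with
  | nil => exact ⟨true, by simp⟩
  | cons l t ih =>
    by_cases hp : pvIsImport l = true
    · have hbp : pvBoundaryPred l = false := by simp [pvBoundaryPred, hp]
      obtain ⟨c, hc⟩ := ih (imp ++ [l])
      refine ⟨c, ?_⟩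
      have hstep : pvStepA (imp, [], true) l = (imp ++ [l], [], true) := by
        simp [pvStepA, pvIsImport] at hp ⊢; simp [hp]
      rw [List.foldl_cons, hstep, hc]
      simp [List.findIdx?_cons, hbp]
      cases h : t.findIdx? pvBoundaryPred <;> simp [hp]
    · simp only [Bool.not_eq_true] at hp
      by_cases hs : PySem.Str.strip l = ""
      · have hbp : pvBoundaryPred l = false := by simp [pvBoundaryPred, hs]
        obtain ⟨c, hc⟩ := ih imp
        refine ⟨c, ?_⟩
        have hstep : pvStepA (imp, [], true) l = (imp, [], true) := by
          simp [pvStepA, pvIsImport] at hp ⊢; simp [hp, hs]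
        rw [List.foldl_cons, hstep, hc]
        simp [List.findIdx?_cons, hbp]
        cases h : t.findIdx? pvBoundaryPred <;> simp [hp]
      · have hbp : pvBoundaryPred l = true := by
          simp [pvBoundaryPred, hp]
          exact hs
        refine ⟨false, ?_⟩
        have hstep : pvStepA (imp, [], true) l = (imp, [l], false) := by
          simp [pvStepA, pvIsImport] at hp ⊢; simp [hp, hs]
        rw [List.foldl_cons, hstep, foldA_false]
        simp [List.findIdx?_cons, hbp]

-- ===== VERDICT (by name: the statement is the Claim_ definition above) =====
theorem organize_js_imports_py_spec : Claim_equal_organize_js_imports_py := by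
  intro content _
  unfold Spec_organize_js_imports_py organize_js_imports_py organize_js_imports_py_alt
  obtain ⟨c, hc⟩ := foldA_true ((PySem.Str.split? content "\n").getD []) []
  simp only [hc, List.nil_append]
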